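-- pv_equiv track=rewrite | github.com/Mohammad-Adilkhan3/leetcode | findLongestSpecialSubstring.py | longestSpecialSubstring
-- ===== SOURCE A (Python) =====
-- def longestSpecialSubstring(s):
--     from collections import Counter
--
--     n = len(s)
--     freq = Counter()
--
--     # Generate all special substrings
--     for i in range(n):
--         char = s[i]
--         for j in range(i, n):
--             if s[j] != char:  # Break if the substring is no longer special
--                 break
--             freq[s[i:j+1]] += 1  # Add substring to the counter
--
--     # Find the longest special substring that occurs at least 3 times
--     max_length = -1
--     for substring, count in freq.items():
--         if count >= 3:
--             max_length = max(max_length, len(substring))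
--
--     return max_length
-- ===== SOURCE B (Python) =====
-- def longestSpecialSubstring(s):
--     # group s into maximal runs of equal characters
--     runs = []
--     for ch in s:
--         if runs and runs[-1][0] == ch:
--             runs[-1] = (ch, runs[-1][1] + 1)
--         else:
--             runs.append((ch, 1))
--     # a run of length L contains L-k+1 occurrences of the k-length special substring
--     cnt = {}
--     for ch, L in runs:
--         for k in range(1, L + 1):
--             cnt[(ch, k)] = cnt.get((ch, k), 0) + (L - k + 1)
--     ans = -1
--     for (_, k), c in cnt.items():
--         if c >= 3:
--             ans = max(ans, k)
--     return ans
-- ===== Notes on version B (the rewrite author's own statement) =====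
-- stated objective: faster
-- what changed: A enumerates every special substring with nested index loops and counts string slices in a Counter; B groups the string once into maximal equal-character runs and adds each run's L-k+1 occurrences per (char, k) key directly, then takes the max key length with count >= 3.
import Mathlib
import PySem

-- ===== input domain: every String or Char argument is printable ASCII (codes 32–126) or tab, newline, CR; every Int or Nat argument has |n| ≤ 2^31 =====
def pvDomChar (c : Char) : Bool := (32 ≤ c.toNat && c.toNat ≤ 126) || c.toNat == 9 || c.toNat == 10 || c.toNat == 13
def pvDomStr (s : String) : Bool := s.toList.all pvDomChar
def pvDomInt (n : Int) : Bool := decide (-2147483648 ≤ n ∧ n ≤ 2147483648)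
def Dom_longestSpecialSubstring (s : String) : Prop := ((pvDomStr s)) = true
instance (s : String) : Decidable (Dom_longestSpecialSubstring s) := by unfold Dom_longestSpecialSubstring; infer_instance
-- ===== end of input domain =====

-- B replaces A's quadratic enumeration of every special substring (a Counter keyed by string slices)
-- by one grouping of s into maximal runs, counting each (char, k) occurrence total per run in one pass.

-- ===== PORT A =====
-- inner loop of A: 'for j in range(i, n): if s[j] != char: break; freq[s[i:j+1]] += 1'
def pvSliceCount (l : List Char) (ch : Char) (i j : Nat)
    (d : PySem.Dict (List Char) Int) : PySem.Dict (List Char) Int :=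
  if h : j < l.length then
    if l[j] = ch then
      pvSliceCount l ch i (j + 1)
        (d.modify (PySem.List.slice l (some (i : Int)) (some ((j : Int) + 1))) 0 (· + 1))
    else d
  else d
termination_by l.length - j

def longestSpecialSubstring (s : String) : Int :=
  ((List.range s.toList.length).foldl
      (fun d i => pvSliceCount s.toList (s.toList.getD i ' ') i i d) PySem.Dict.empty).items.foldl
    (fun m p => if p.2 ≥ 3 then max m ((p.1.length : Int)) else m) (-1)

-- ===== PORT B =====
-- B's run grouping: 'if runs and runs[-1][0] == ch: runs[-1] = (ch, runs[-1][1] + 1) else: runs.append((ch, 1))'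
def pvRunStep (runs : List (Char × Int)) (ch : Char) : List (Char × Int) :=
  match runs.getLast? with
  | some (c, m) => if c = ch then runs.dropLast ++ [(ch, m + 1)] else runs ++ [(ch, 1)]
  | none => runs ++ [(ch, 1)]

def pvRunsB (l : List Char) : List (Char × Int) := l.foldl pvRunStep []

-- 'for ch, L in runs: for k in range(1, L+1): cnt[(ch,k)] = cnt.get((ch,k), 0) + (L - k + 1)'
def pvCntB (runs : List (Char × Int)) : PySem.Dict (Char × Int) Int :=
  runs.foldl (fun d p =>
    (PySem.List.pyRange 1 (p.2 + 1) 1).foldl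
      (fun d k => d.insert (p.1, k) (d.getD (p.1, k) 0 + (p.2 - k + 1))) d)
    PySem.Dict.empty

def longestSpecialSubstring_alt (s : String) : Int :=
  (pvCntB (pvRunsB s.toList)).items.foldl
    (fun m p => if p.2 ≥ 3 then max m p.1.2 else m) (-1)

-- ===== PRECONDITION & SPEC =====
def Spec_longestSpecialSubstring (s : String) (out : Int) : Prop := out = longestSpecialSubstring_alt s
instance (s : String) (out : Int) : Decidable (Spec_longestSpecialSubstring s out) := by unfold Spec_longestSpecialSubstring; infer_instance

-- ===== CLAIM (what is proved, stated in full; the proofs are below) =====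
def Claim_equal_longestSpecialSubstring : Prop := ∀ (s : String), Dom_longestSpecialSubstring s → Spec_longestSpecialSubstring s (longestSpecialSubstring s)

-- ===== LEMMAS AND PROOFS =====

-- number of start positions at which the k-length constant-c substring occurs in l
def pvOcc (l : List Char) (c : Char) (k : Nat) : Nat :=
  match l with
  | [] => 0
  | a :: t => pvOcc t c k + (if (a :: t).take k = List.replicate k c then 1 else 0)

-- length of the maximal constant-c prefix of l
def pvPlen (c : Char) (l : List Char) : Nat :=
  match l with
  | [] => 0
  | a :: t => if a = c then pvPlen c t + 1 else 0

-- reference run decomposition (head recursion) and per-(c,k) occurrence count over runs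
def pvMerge (c : Char) (m : Int) (rs : List (Char × Int)) : List (Char × Int) :=
  match rs with
  | (c', m') :: t => if c' = c then (c, m + m') :: t else (c, m) :: rs
  | [] => [(c, m)]

def pvRunsSpec (l : List Char) : List (Char × Int) :=
  match l with
  | [] => []
  | a :: t => pvMerge a 1 (pvRunsSpec t)

def pvRocc (rs : List (Char × Int)) (c : Char) (k : Int) : Int :=
  match rs with
  | [] => 0
  | (c', L) :: t => pvRocc t c k + (if c' = c ∧ 1 ≤ k ∧ k ≤ L then L - k + 1 else 0)

theorem pvTakeRep (l : List Char) (c : Char) (k : Nat) :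
    l.take k = List.replicate k c ↔ k ≤ pvPlen c l := by
  induction l generalizing k with
  | nil => cases k with
    | zero => simp [pvPlen]
    | succ k => simp [pvPlen]
  | cons a t ih => cases k with
    | zero => simp
    | succ k =>
      simp only [List.take_succ_cons, List.replicate_succ, List.cons.injEq, pvPlen]
      constructor
      · rintro ⟨rfl, h⟩
        have := (ih k).mp h
        simp; omega
      · intro h
        by_cases hac : a = c
        · subst hac; simp at h
          exact ⟨rfl, (ih k).mpr (by omega)⟩
        · simp [hac] at h

def pvHead (rs : List (Char × Int)) (c : Char) : Int :=
  match rs with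
  | (c', m) :: _ => if c = c' then m else 0
  | [] => 0

theorem pvMerge_cons (c : Char) (m : Int) (c' : Char) (m' : Int) (t : List (Char × Int)) :
    pvMerge c m ((c', m') :: t) = if c' = c then (c, m + m') :: t else (c, m) :: (c', m') :: t := rfl

theorem pvMerge_nil (c : Char) (m : Int) : pvMerge c m [] = [(c, m)] := rfl

theorem pvFoldRun (l : List Char) : ∀ (rs : List (Char × Int)) (c : Char) (m : Int),
    l.foldl pvRunStep (rs ++ [(c, m)]) = rs ++ pvMerge c m (pvRunsSpec l) := by
  induction l with
  | nil => intro rs c m; simp [pvRunsSpec, pvMerge_nil]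
  | cons a t ih =>
    intro rs c m
    simp only [List.foldl_cons]
    have hstep : pvRunStep (rs ++ [(c, m)]) a =
        if c = a then rs ++ [(a, m + 1)] else (rs ++ [(c, m)]) ++ [(a, 1)] := by
      unfold pvRunStep
      rw [List.getLast?_concat]
      by_cases h : c = a
      · simp [h, List.dropLast_concat]
      · simp [h]
    rw [hstep]
    by_cases hca : c = a
    · rw [if_pos hca]
      rw [ih rs a (m + 1)]
      subst hca
      congr 1
      show pvMerge c (m + 1) (pvRunsSpec t) = pvMerge c m (pvRunsSpec (c :: t))
      simp only [pvRunsSpec]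
      cases hrs : pvRunsSpec t with
      | nil => simp [pvMerge_nil, pvMerge_cons]
      | cons p rest =>
        obtain ⟨c', m'⟩ := p
        by_cases h : c' = c
        · subst h
          simp [pvMerge_cons]
          ring
        · simp [pvMerge_cons, h]
    · rw [if_neg hca]
      rw [ih (rs ++ [(c, m)]) a 1]
      have hne : pvMerge c m (pvRunsSpec (a :: t)) = (c, m) :: pvMerge a 1 (pvRunsSpec t) := by
        simp only [pvRunsSpec]
        cases hrs : pvRunsSpec t with
        | nil => simp [pvMerge_nil, pvMerge_cons, Ne.symm hca]
        | cons p rest =>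
          obtain ⟨c', m'⟩ := p
          by_cases h : c' = a
          · subst h
            simp [pvMerge_cons, Ne.symm hca]
          · simp [pvMerge_cons, h, Ne.symm hca]
      rw [hne]
      simp

theorem pvRunsB_eq_spec (l : List Char) : pvRunsB l = pvRunsSpec l := by
  cases l with
  | nil => rfl
  | cons a t =>
    show (a :: t).foldl pvRunStep [] = _
    simp only [List.foldl_cons]
    have h0 : pvRunStep [] a = [] ++ [(a, 1)] := by simp [pvRunStep]
    rw [h0, pvFoldRun t [] a 1]
    simp [pvRunsSpec]

theorem pvPlen_runsSpec (l : List Char) (c : Char) :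
    (pvPlen c l : Int) = pvHead (pvRunsSpec l) c := by
  induction l with
  | nil => simp [pvPlen, pvRunsSpec, pvHead]
  | cons a t ih =>
    simp only [pvRunsSpec, pvPlen]
    cases hrs : pvRunsSpec t with
    | nil =>
      rw [hrs] at ih
      simp only [pvHead] at ih
      by_cases h : a = c
      · subst h
        simp [pvMerge_nil, pvHead]
        omega
      · simp [pvMerge_nil, pvHead, h, Ne.symm h]
    | cons p rest =>
      obtain ⟨c', m'⟩ := p
      rw [hrs] at ih
      simp only [pvHead] at ih
      by_cases hc'a : c' = a
      · subst hc'a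
        rw [pvMerge_cons, if_pos rfl]
        by_cases h : c = c'
        · subst h
          simp [pvHead] at ih ⊢
          omega
        · have h' : ¬ c' = c := fun hh => h hh.symm
          simp [pvHead, h, h']
      · rw [pvMerge_cons, if_neg hc'a]
        by_cases h : a = c
        · subst h
          have hz : pvPlen a t = 0 := by
            have h2 : ¬ a = c' := fun hh => hc'a hh.symm
            rw [if_neg h2] at ih
            omega
          simp [hz, pvHead]
        · rw [if_neg h]
          simp only [pvHead, if_neg (fun hh : c = a => h hh.symm)]
          simpa [pvHead] using ih

def pvPassA (d : PySem.Dict (List Char) Int) (c : Char) (off : Nat) (m : Nat) :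
    PySem.Dict (List Char) Int :=
  (List.range m).foldl (fun d k => d.modify (List.replicate (off + k + 1) c) 0 (· + 1)) d

def pvBuildA (l : List Char) (d : PySem.Dict (List Char) Int) : PySem.Dict (List Char) Int :=
  match l with
  | [] => d
  | a :: t => pvBuildA t (pvPassA d a 0 (pvPlen a (a :: t)))

theorem pvPassA_shift (d : PySem.Dict (List Char) Int) (c : Char) (off m : Nat) :
    pvPassA d c off (m + 1)
      = pvPassA (d.modify (List.replicate (off + 1) c) 0 (· + 1)) c (off + 1) m := by
  unfold pvPassA
  rw [List.range_succ_eq_map, List.foldl_cons, List.foldl_map]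
  congr 1
  funext d' k
  congr 2
  omega

theorem pvPassA_getD (d : PySem.Dict (List Char) Int) (a c : Char) (m k : Nat) (hk : 1 ≤ k) :
    (pvPassA d a 0 m).getD (List.replicate k c) 0
      = d.getD (List.replicate k c) 0 + (if c = a ∧ k ≤ m then 1 else 0) := by
  induction m with
  | zero =>
    simp only [pvPassA, List.range_zero, List.foldl_nil]
    rw [if_neg (by omega)]
    ring
  | succ m ih =>
    unfold pvPassA
    rw [List.range_succ, List.foldl_append, List.foldl_cons, List.foldl_nil]
    rw [PySem.Dict.getD_modify]
    unfold pvPassA at ih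
    by_cases heq : List.replicate k c = List.replicate (0 + m + 1) a
    · rw [if_pos heq, ← heq, ih]
      have hkm : k = 0 + m + 1 := (List.replicate_inj.mp heq).1
      have hca : c = a := by
        rcases (List.replicate_inj.mp heq).2 with h0 | h
        · omega
        · exact h
      rw [if_neg (by omega), if_pos ⟨hca, by omega⟩]
      ring
    · rw [if_neg heq, ih]
      by_cases hca : c = a
      · by_cases hkm : k ≤ m
        · rw [if_pos ⟨hca, hkm⟩, if_pos ⟨hca, by omega⟩]
        · have hkm1 : ¬ k ≤ m + 1 := by
            intro hle
            have hk1 : k = 0 + m + 1 := by omega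
            exact heq (by rw [hk1, hca])
          rw [if_neg (by tauto), if_neg (by tauto)]
      · rw [if_neg (by tauto), if_neg (by tauto)]

theorem pvPassA_keys (d : PySem.Dict (List Char) Int) (a : Char) (m : Nat) (key : List Char) :
    key ∈ (pvPassA d a 0 m).keys
      ↔ key ∈ d.keys ∨ ∃ k, 1 ≤ k ∧ k ≤ m ∧ key = List.replicate k a := by
  induction m with
  | zero =>
    simp only [pvPassA, List.range_zero, List.foldl_nil]
    constructor
    · exact Or.inl
    · rintro (h | ⟨k, h1, h2, rfl⟩)
      · exact h
      · omega
  | succ m ih =>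
    unfold pvPassA
    rw [List.range_succ, List.foldl_append, List.foldl_cons, List.foldl_nil]
    rw [PySem.Dict.keys_modify, PySem.Dict.mem_keys_insert]
    unfold pvPassA at ih
    rw [ih]
    constructor
    · rintro (rfl | hd | ⟨k, h1, h2, rfl⟩)
      · exact Or.inr ⟨m + 1, by omega, by omega, by rw [show 0 + m + 1 = m + 1 by omega]⟩
      · exact Or.inl hd
      · exact Or.inr ⟨k, h1, by omega, rfl⟩
    · rintro (hd | ⟨k, h1, h2, rfl⟩)
      · exact Or.inr (Or.inl hd)
      · rcases Nat.lt_or_ge k (m + 1) with h' | h'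
        · exact Or.inr (Or.inr ⟨k, h1, by omega, rfl⟩)
        · exact Or.inl (by rw [show k = 0 + m + 1 by omega])

theorem pvBuildA_getD (l : List Char) (d : PySem.Dict (List Char) Int) (c : Char) (k : Nat)
    (hk : 1 ≤ k) :
    (pvBuildA l d).getD (List.replicate k c) 0
      = d.getD (List.replicate k c) 0 + (pvOcc l c k : Int) := by
  induction l generalizing d with
  | nil => simp [pvBuildA, pvOcc]
  | cons a t ih =>
    show (pvBuildA t (pvPassA d a 0 (pvPlen a (a :: t)))).getD _ 0 = _
    rw [ih, pvPassA_getD d a c _ k hk]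
    have hind : (if c = a ∧ k ≤ pvPlen a (a :: t) then (1 : Int) else 0)
        = (if (a :: t).take k = List.replicate k c then (1 : Int) else 0) := by
      by_cases htk : (a :: t).take k = List.replicate k c
      · rw [if_pos htk]
        have hkp : k ≤ pvPlen c (a :: t) := (pvTakeRep _ _ _).mp htk
        have hca : a = c := by
          by_contra hne
          simp [pvPlen, hne] at hkp
          omega
        subst hca
        rw [if_pos ⟨rfl, hkp⟩]
      · rw [if_neg htk]
        rw [if_neg ?_]
        rintro ⟨rfl, hle⟩
        exact htk ((pvTakeRep _ _ _).mpr hle)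
    rw [hind]
    show _ = d.getD _ 0 + ((pvOcc t c k + if (a :: t).take k = List.replicate k c then 1 else 0 : Nat) : Int)
    push_cast
    split_ifs <;> ring

theorem pvBuildA_keys (l : List Char) (d : PySem.Dict (List Char) Int) (key : List Char) :
    key ∈ (pvBuildA l d).keys ↔
      key ∈ d.keys ∨ ∃ c k, 1 ≤ k ∧ key = List.replicate k c ∧ 1 ≤ pvOcc l c k := by
  induction l generalizing d with
  | nil =>
    simp [pvBuildA, pvOcc]
  | cons a t ih =>
    show key ∈ (pvBuildA t (pvPassA d a 0 (pvPlen a (a :: t)))).keys ↔ _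
    rw [ih, pvPassA_keys]
    constructor
    · rintro ((hd | ⟨k, h1, h2, rfl⟩) | ⟨c, k, h1, rfl, h3⟩)
      · exact Or.inl hd
      · refine Or.inr ⟨a, k, h1, rfl, ?_⟩
        have : (a :: t).take k = List.replicate k a := (pvTakeRep _ _ _).mpr h2
        simp [pvOcc, this]
      · refine Or.inr ⟨c, k, h1, rfl, ?_⟩
        simp [pvOcc]
        omega
    · rintro (hd | ⟨c, k, h1, rfl, h3⟩)
      · exact Or.inl (Or.inl hd)
      · simp only [pvOcc] at h3
        by_cases htk : (a :: t).take k = List.replicate k c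
        · have hk2 : k ≤ pvPlen c (a :: t) := (pvTakeRep _ _ _).mp htk
        -- c must equal a since 1 ≤ k ≤ pvPlen c (a::t)
          have hca : a = c := by
            by_contra hne
            simp [pvPlen, hne] at hk2
            omega
          subst hca
          exact Or.inl (Or.inr ⟨k, h1, hk2, rfl⟩)
        · rw [if_neg htk] at h3
          exact Or.inr ⟨c, k, h1, rfl, by omega⟩

theorem pvBuildA_nodup (l : List Char) (d : PySem.Dict (List Char) Int) (h : d.keys.Nodup) :
    (pvBuildA l d).keys.Nodup := by
  induction l generalizing d with
  | nil => exact h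
  | cons a t ih =>
    refine ih _ ?_
    exact PySem.Dict.nodup_keys_foldl_modify_key (List.range (pvPlen a (a :: t)))
      (fun k => List.replicate (0 + k + 1) a) 0 (fun _ _ => (· + 1)) d h

theorem pvSliceCount_eq_pass (l : List Char) (c : Char) (i : Nat) :
    ∀ (j : Nat) (d : PySem.Dict (List Char) Int), i ≤ j →
    (l.drop i).take (j - i) = List.replicate (j - i) c →
    pvSliceCount l c i j d = pvPassA d c (j - i) (pvPlen c (l.drop j)) := by
  intro j
  induction hn : l.length - j generalizing j with
  | zero =>
    intro d hij hpre
    unfold pvSliceCount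
    rcases Nat.lt_or_ge j l.length with h | h
    · omega
    · rw [dif_neg (by omega)]
      rw [List.drop_eq_nil_of_le h]
      simp [pvPlen, pvPassA]
  | succ n ihn =>
    intro d hij hpre
    have hj : j < l.length := by omega
    unfold pvSliceCount
    rw [dif_pos hj]
    by_cases hc : l[j] = c
    · rw [if_pos hc]
      have hpre' : (l.drop i).take (j + 1 - i) = List.replicate (j + 1 - i) c := by
        have h1 : (l.drop i).take (j - i + 1) = (l.drop i).take (j - i) ++ (l.drop i)[j - i]?.toList :=
          List.take_succ
        have h2 : (l.drop i)[j - i]? = some l[j] := by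
          rw [List.getElem?_drop]
          rw [show i + (j - i) = j by omega]
          exact List.getElem?_eq_getElem hj
        rw [show j + 1 - i = j - i + 1 by omega, h1, h2, hc]
        rw [hpre]
        simp [List.replicate_succ']
      have hkey : PySem.List.slice l (some (i : Int)) (some ((j : Int) + 1))
          = List.replicate (j + 1 - i) c := by
        rw [show ((j : Int) + 1) = ((j + 1 : Nat) : Int) by push_cast; ring]
        rw [PySem.List.slice_natCast]
        exact hpre'
      rw [hkey]
      rw [ihn (j + 1) (by omega) _ (by omega) hpre']
      rw [List.drop_eq_getElem_cons hj]
      rw [show pvPlen c (l[j] :: List.drop (j + 1) l) = pvPlen c (List.drop (j + 1) l) + 1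
        from by simp [pvPlen, hc]]
      rw [pvPassA_shift]
      rw [show j + 1 - i = (j - i) + 1 by omega]
    · rw [if_neg hc]
      rw [List.drop_eq_getElem_cons hj]
      simp only [pvPlen, if_neg hc, pvPassA, List.range_zero, List.foldl_nil]

theorem pvFold_eq_build (l : List Char) (d : PySem.Dict (List Char) Int) :
    (List.range l.length).foldl (fun d i => pvSliceCount l (l.getD i ' ') i i d) d
      = pvBuildA l d := by
  induction l generalizing d with
  | nil => simp [pvBuildA]
  | cons a t ih =>
    rw [List.length_cons, List.range_succ_eq_map, List.foldl_cons, List.foldl_map]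
    have h0 : pvSliceCount (a :: t) ((a :: t).getD 0 ' ') 0 0 d
        = pvPassA d a 0 (pvPlen a (a :: t)) := by
      have := pvSliceCount_eq_pass (a :: t) a 0 0 d (le_rfl) (by simp)
      simpa using this
    rw [h0]
    simp only [Nat.succ_eq_add_one]
    have hfun : (fun (x : PySem.Dict (List Char) Int) (y : Nat) =>
        pvSliceCount (a :: t) ((a :: t).getD (y + 1) ' ') (y + 1) (y + 1) x)
        = fun x y => pvSliceCount t (t.getD y ' ') y y x := by
      funext acc y
      have hgd : (a :: t).getD (y + 1) ' ' = t.getD y ' ' := rfl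
      rw [hgd]
      rw [pvSliceCount_eq_pass (a :: t) (t.getD y ' ') (y + 1) (y + 1) acc le_rfl (by simp)]
      rw [pvSliceCount_eq_pass t (t.getD y ' ') y y acc le_rfl (by simp)]
      simp
    rw [hfun]
    exact ih _

theorem pvInnerB_getD (c' : Char) (L : Int) (c : Char) (k : Int) :
    ∀ (M : Nat) (d : PySem.Dict (Char × Int) Int),
    ((List.range M).foldl (fun d t => d.insert (c', (1 + t : Int))
        (d.getD (c', (1 + t : Int)) 0 + (L - (1 + t) + 1))) d).getD (c, k) 0
      = d.getD (c, k) 0 + (if c' = c ∧ 1 ≤ k ∧ k ≤ (M : Int) then L - k + 1 else 0) := by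
  intro M
  induction M with
  | zero =>
    intro d
    rw [if_neg (by rintro ⟨_, h1, h2⟩; omega)]
    simp
  | succ M ih =>
    intro d
    rw [List.range_succ, List.foldl_append, List.foldl_cons, List.foldl_nil]
    rw [PySem.Dict.getD_insert, ih]
    by_cases heq : (c, k) = (c', (1 + M : Int))
    · rw [if_pos heq]
      injection heq with hc hk2
      subst hc
      subst hk2
      rw [ih]
      rw [if_neg (by rintro ⟨_, h1, h2⟩; omega)]
      rw [if_pos ⟨rfl, by omega, by push_cast; omega⟩]
      ring
    · rw [if_neg heq]
      have hne : ¬ (c' = c ∧ 1 ≤ k ∧ k = 1 + (M : Int)) := by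
        rintro ⟨rfl, h1, h2⟩
        exact heq (by rw [h2])
      by_cases hc : c' = c
      · by_cases hk1 : 1 ≤ k
        · by_cases hkM : k ≤ (M : Int)
          · rw [if_pos ⟨hc, hk1, hkM⟩, if_pos ⟨hc, hk1, by push_cast; omega⟩]
          · rw [if_neg (by tauto)]
            rw [if_neg (by push_cast; rintro ⟨_, h1, h2⟩; exact hne ⟨hc, h1, by omega⟩)]
        · rw [if_neg (by tauto), if_neg (by tauto)]
      · rw [if_neg (by tauto), if_neg (by tauto)]

theorem pvCntB_getD' (rs : List (Char × Int)) :
    ∀ (d : PySem.Dict (Char × Int) Int) (c : Char) (k : Int),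
    (rs.foldl (fun d p =>
      (PySem.List.pyRange 1 (p.2 + 1) 1).foldl
        (fun d k => d.insert (p.1, k) (d.getD (p.1, k) 0 + (p.2 - k + 1))) d) d).getD (c, k) 0
      = d.getD (c, k) 0 + pvRocc rs c k := by
  induction rs with
  | nil => intro d c k; simp [pvRocc]
  | cons p t ih =>
    intro d c k
    obtain ⟨c', L⟩ := p
    rw [List.foldl_cons, ih]
    dsimp only
    rw [PySem.List.pyRange_one, show (L + 1 - 1 : Int) = L from by ring, List.foldl_map]
    rw [pvInnerB_getD c' L c k L.toNat d]
    have hiff : (c' = c ∧ 1 ≤ k ∧ k ≤ (L.toNat : Int)) ↔ (c' = c ∧ 1 ≤ k ∧ k ≤ L) := by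
      constructor
      · rintro ⟨h, h1, h2⟩; exact ⟨h, h1, by omega⟩
      · rintro ⟨h, h1, h2⟩; exact ⟨h, h1, by omega⟩
    show _ = d.getD (c, k) 0 + (pvRocc t c k + _)
    rw [if_congr hiff rfl rfl]
    ring

theorem pvCntB_getD (rs : List (Char × Int)) (c : Char) (k : Int) :
    (pvCntB rs).getD (c, k) 0 = pvRocc rs c k := by
  unfold pvCntB
  rw [pvCntB_getD', PySem.Dict.getD_empty]
  ring

theorem pvRocc_nonneg (rs : List (Char × Int)) (c : Char) (k : Int) : 0 ≤ pvRocc rs c k := by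
  induction rs with
  | nil => simp [pvRocc]
  | cons p t ih =>
    obtain ⟨c', L⟩ := p
    show 0 ≤ pvRocc t c k + _
    split_ifs with h
    · obtain ⟨_, h1, h2⟩ := h
      omega
    · omega

theorem pvRocc_pos_iff (rs : List (Char × Int)) (c : Char) (k : Int) :
    1 ≤ pvRocc rs c k ↔ ∃ p ∈ rs, p.1 = c ∧ 1 ≤ k ∧ k ≤ p.2 := by
  induction rs with
  | nil => simp [pvRocc]
  | cons p t ih =>
    obtain ⟨c', L⟩ := p
    show 1 ≤ pvRocc t c k + _ ↔ _
    have hnn := pvRocc_nonneg t c k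
    constructor
    · intro h
      by_cases hfire : c' = c ∧ 1 ≤ k ∧ k ≤ L
      · exact ⟨(c', L), List.mem_cons_self .., hfire⟩
      · rw [if_neg hfire] at h
        obtain ⟨q, hq, hcond⟩ := ih.mp (by omega)
        exact ⟨q, List.mem_cons_of_mem _ hq, hcond⟩
    · rintro ⟨q, hq, hcond⟩
      rcases List.mem_cons.mp hq with rfl | hq
      · obtain ⟨h1, h2, h3⟩ := hcond
        rw [if_pos ⟨h1, h2, h3⟩]
        omega
      · have := ih.mpr ⟨q, hq, hcond⟩
        split_ifs with h
        · obtain ⟨_, h1, h2⟩ := h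
          omega
        · omega

theorem pvInnerB_keys (c' : Char) (L : Int) (c : Char) (k : Int) :
    ∀ (M : Nat) (d : PySem.Dict (Char × Int) Int),
    (c, k) ∈ ((List.range M).foldl (fun d t => d.insert (c', (1 + t : Int))
        (d.getD (c', (1 + t : Int)) 0 + (L - (1 + t) + 1))) d).keys
      ↔ (c, k) ∈ d.keys ∨ (c = c' ∧ 1 ≤ k ∧ k ≤ (M : Int)) := by
  intro M
  induction M with
  | zero =>
    intro d
    simp
    rintro rfl h1 h2
    omega
  | succ M ih =>
    intro d
    rw [List.range_succ, List.foldl_append, List.foldl_cons, List.foldl_nil]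
    rw [PySem.Dict.mem_keys_insert, ih]
    constructor
    · rintro (heq | hd | ⟨rfl, h1, h2⟩)
      · injection heq with hc hk2
        subst hc
        subst hk2
        exact Or.inr ⟨rfl, by omega, by push_cast; omega⟩
      · exact Or.inl hd
      · exact Or.inr ⟨rfl, h1, by push_cast; omega⟩
    · rintro (hd | ⟨rfl, h1, h2⟩)
      · exact Or.inr (Or.inl hd)
      · by_cases hkM : k ≤ (M : Int)
        · exact Or.inr (Or.inr ⟨rfl, h1, hkM⟩)
        · exact Or.inl (by rw [show k = 1 + (M : Int) by push_cast at h2 ⊢; omega])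

theorem pvCntB_keys' (rs : List (Char × Int)) :
    ∀ (d : PySem.Dict (Char × Int) Int) (c : Char) (k : Int),
    (c, k) ∈ (rs.foldl (fun d p =>
      (PySem.List.pyRange 1 (p.2 + 1) 1).foldl
        (fun d k => d.insert (p.1, k) (d.getD (p.1, k) 0 + (p.2 - k + 1))) d) d).keys
      ↔ (c, k) ∈ d.keys ∨ ∃ p ∈ rs, p.1 = c ∧ 1 ≤ k ∧ k ≤ p.2 := by
  induction rs with
  | nil => intro d c k; simp
  | cons p t ih =>
    intro d c k
    obtain ⟨c', L⟩ := p
    rw [List.foldl_cons, ih]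
    dsimp only
    rw [PySem.List.pyRange_one, show (L + 1 - 1 : Int) = L from by ring, List.foldl_map]
    rw [pvInnerB_keys c' L c k L.toNat d]
    constructor
    · rintro ((hd | ⟨rfl, h1, h2⟩) | ⟨q, hq, hcond⟩)
      · exact Or.inl hd
      · exact Or.inr ⟨(c, L), List.mem_cons_self .., rfl, h1, by omega⟩
      · exact Or.inr ⟨q, List.mem_cons_of_mem _ hq, hcond⟩
    · rintro (hd | ⟨q, hq, hcond⟩)
      · exact Or.inl (Or.inl hd)
      · rcases List.mem_cons.mp hq with rfl | hq
        · exact Or.inl (Or.inr ⟨hcond.1.symm, hcond.2.1, by push_cast; omega⟩)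
        · exact Or.inr ⟨q, hq, hcond⟩

theorem pvCntB_keys (rs : List (Char × Int)) (c : Char) (k : Int) :
    (c, k) ∈ (pvCntB rs).keys ↔ 1 ≤ pvRocc rs c k := by
  unfold pvCntB
  rw [pvCntB_keys', pvRocc_pos_iff]
  simp

theorem pvCntB_nodup (rs : List (Char × Int)) : (pvCntB rs).keys.Nodup := by
  unfold pvCntB
  generalize hd : (PySem.Dict.empty : PySem.Dict (Char × Int) Int) = d0
  have h0 : d0.keys.Nodup := hd ▸ PySem.Dict.nodup_keys_empty
  clear hd
  induction rs generalizing d0 with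
  | nil => exact h0
  | cons p t ih =>
    rw [List.foldl_cons]
    refine ih _ ?_
    exact PySem.Dict.nodup_keys_foldl_insert_key (PySem.List.pyRange 1 (p.2 + 1) 1)
      (fun k => (p.1, k)) (fun d k => d.getD (p.1, k) 0 + (p.2 - k + 1)) d0 h0

theorem pvRocc_merge (a c : Char) (hs : List (Char × Int)) (k : Int) (hk : 1 ≤ k) :
    pvRocc (pvMerge a 1 hs) c k
      = pvRocc hs c k + (if k ≤ pvHead (pvMerge a 1 hs) c then 1 else 0) := by
  cases hs with
  | nil =>
    rw [pvMerge_nil]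
    simp only [pvRocc, pvHead]
    by_cases hc : c = a
    · subst hc
      simp only [eq_self_iff_true, true_and, if_true]
      split_ifs <;> omega
    · simp only [Ne.symm hc, false_and, if_false, if_neg hc]
      split_ifs <;> omega
  | cons q t =>
    obtain ⟨b, m⟩ := q
    rw [pvMerge_cons]
    by_cases hb : b = a
    · subst hb
      rw [if_pos rfl]
      simp only [pvRocc, pvHead]
      by_cases hc : c = b
      · subst hc
        simp only [eq_self_iff_true, true_and, if_true]
        split_ifs <;> omega
      · simp only [Ne.symm hc, false_and, if_false, if_neg hc]
        split_ifs <;> omega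
    · rw [if_neg hb]
      simp only [pvRocc, pvHead]
      by_cases hc : c = a
      · subst hc
        simp only [eq_self_iff_true, true_and, if_true]
        split_ifs <;> omega
      · simp only [Ne.symm hc, false_and, if_false, if_neg hc]
        split_ifs <;> omega

theorem pvOcc_eq_rocc (l : List Char) (c : Char) (k : Nat) (hk : 1 ≤ k) :
    (pvOcc l c k : Int) = pvRocc (pvRunsSpec l) c (k : Int) := by
  induction l with
  | nil => simp [pvOcc, pvRunsSpec, pvRocc]
  | cons a t ih =>
    show ((pvOcc t c k + if (a :: t).take k = List.replicate k c then 1 else 0 : Nat) : Int) = _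
    show _ = pvRocc (pvMerge a 1 (pvRunsSpec t)) c (k : Int)
    rw [pvRocc_merge a c (pvRunsSpec t) (k : Int) (by exact_mod_cast hk)]
    have hplen : ((pvPlen c (a :: t) : Nat) : Int) = pvHead (pvMerge a 1 (pvRunsSpec t)) c := by
      have := pvPlen_runsSpec (a :: t) c
      simpa [pvRunsSpec] using this
    have hind : ((if (a :: t).take k = List.replicate k c then 1 else 0 : Nat) : Int)
        = (if (k : Int) ≤ pvHead (pvMerge a 1 (pvRunsSpec t)) c then 1 else 0) := by
      by_cases htk : (a :: t).take k = List.replicate k c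
      · have hle : (k : Int) ≤ pvHead (pvMerge a 1 (pvRunsSpec t)) c := by
          rw [← hplen]
          exact_mod_cast (pvTakeRep _ _ _).mp htk
        rw [if_pos htk, if_pos hle]
        norm_num
      · have hle : ¬ (k : Int) ≤ pvHead (pvMerge a 1 (pvRunsSpec t)) c := by
          rw [← hplen]
          intro hle
          exact htk ((pvTakeRep _ _ _).mpr (by exact_mod_cast hle))
        rw [if_neg htk, if_neg hle]
        norm_num
    rw [Nat.cast_add, ih, hind]

theorem pvMaxSet (xs ys : List Int) (h : ∀ x, x ∈ xs ↔ x ∈ ys) :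
    xs.foldl max (-1) = ys.foldl max (-1) := by
  apply le_antisymm
  · rcases PySem.List.foldl_max_mem xs (-1) with heq | hmem
    · rw [heq]
      exact (PySem.List.le_foldl_max ys (-1)).1
    · exact (PySem.List.le_foldl_max ys (-1)).2 _ ((h _).mp hmem)
  · rcases PySem.List.foldl_max_mem ys (-1) with heq | hmem
    · rw [heq]
      exact (PySem.List.le_foldl_max xs (-1)).1
    · exact (PySem.List.le_foldl_max xs (-1)).2 _ ((h _).mpr hmem)

theorem pvMemA (l : List Char) (x : Int) :
    x ∈ ((pvBuildA l PySem.Dict.empty).items.filter (fun p => decide (p.2 ≥ 3))).map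
        (fun p => ((p.1.length : Int)))
      ↔ ∃ (c : Char) (k : Nat), 1 ≤ k ∧ x = (k : Int) ∧ 3 ≤ pvOcc l c k := by
  have hnd : (pvBuildA l PySem.Dict.empty).keys.Nodup :=
    pvBuildA_nodup l _ PySem.Dict.nodup_keys_empty
  simp only [List.mem_map, List.mem_filter, decide_eq_true_eq]
  constructor
  · rintro ⟨⟨key, v⟩, ⟨hmem, hv⟩, rfl⟩
    have hkeys : key ∈ (pvBuildA l PySem.Dict.empty).keys :=
      PySem.Dict.mem_keys_of_mem_items _ hmem
    obtain ⟨c, k, hk, rfl, _⟩ :=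
      ((pvBuildA_keys l PySem.Dict.empty key).mp hkeys).resolve_left
        (by simp [PySem.Dict.keys_empty])
    have hval : (pvBuildA l PySem.Dict.empty).getD (List.replicate k c) 0 = v :=
      PySem.Dict.getD_of_mem_items _ hmem hnd 0
    rw [pvBuildA_getD l PySem.Dict.empty c k hk, PySem.Dict.getD_empty] at hval
    refine ⟨c, k, hk, by simp, ?_⟩
    have : (3 : Int) ≤ (pvOcc l c k : Int) := by omega
    exact_mod_cast this
  · rintro ⟨c, k, hk, rfl, hocc⟩
    have hkeys : List.replicate k c ∈ (pvBuildA l PySem.Dict.empty).keys :=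
      (pvBuildA_keys l PySem.Dict.empty _).mpr (Or.inr ⟨c, k, hk, rfl, by omega⟩)
    have hne : (pvBuildA l PySem.Dict.empty).get? (List.replicate k c) ≠ none := by
      intro h
      exact ((PySem.Dict.get?_eq_none_iff_not_mem_keys _ _).mp h) hkeys
    obtain ⟨v, hv⟩ := Option.ne_none_iff_exists'.mp hne
    have hitems := PySem.Dict.mem_items_of_get?_eq_some _ hv
    have hval : (pvBuildA l PySem.Dict.empty).getD (List.replicate k c) 0 = v := by
      rw [PySem.Dict.getD_eq_get?_getD, hv]
      rfl
    rw [pvBuildA_getD l PySem.Dict.empty c k hk, PySem.Dict.getD_empty] at hval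
    refine ⟨(List.replicate k c, v), ⟨hitems, by omega⟩, by simp⟩

theorem pvMemB (l : List Char) (x : Int) :
    x ∈ ((pvCntB (pvRunsSpec l)).items.filter (fun p => decide (p.2 ≥ 3))).map (fun p => p.1.2)
      ↔ ∃ (c : Char) (k : Nat), 1 ≤ k ∧ x = (k : Int) ∧ 3 ≤ pvOcc l c k := by
  have hnd := pvCntB_nodup (pvRunsSpec l)
  simp only [List.mem_map, List.mem_filter, decide_eq_true_eq]
  constructor
  · rintro ⟨⟨⟨c, k⟩, v⟩, ⟨hmem, hv⟩, rfl⟩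
    have hkeys : (c, k) ∈ (pvCntB (pvRunsSpec l)).keys :=
      PySem.Dict.mem_keys_of_mem_items _ hmem
    have hrpos : 1 ≤ pvRocc (pvRunsSpec l) c k := (pvCntB_keys _ c k).mp hkeys
    obtain ⟨p, hp, hpc, hk1, hk2⟩ := (pvRocc_pos_iff _ c k).mp hrpos
    have hval : (pvCntB (pvRunsSpec l)).getD (c, k) 0 = v :=
      PySem.Dict.getD_of_mem_items _ hmem hnd 0
    rw [pvCntB_getD] at hval
    refine ⟨c, k.toNat, by omega, by simp; omega, ?_⟩
    have hocc := pvOcc_eq_rocc l c k.toNat (by omega)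
    rw [show ((k.toNat : Nat) : Int) = k by omega] at hocc
    have : (3 : Int) ≤ (pvOcc l c k.toNat : Int) := by omega
    exact_mod_cast this
  · rintro ⟨c, k, hk, rfl, hocc⟩
    have hocc' := pvOcc_eq_rocc l c k hk
    have hrpos : 1 ≤ pvRocc (pvRunsSpec l) c (k : Int) := by omega
    have hkeys : (c, (k : Int)) ∈ (pvCntB (pvRunsSpec l)).keys := (pvCntB_keys _ c _).mpr hrpos
    have hne : (pvCntB (pvRunsSpec l)).get? (c, (k : Int)) ≠ none := by
      intro h
      exact ((PySem.Dict.get?_eq_none_iff_not_mem_keys _ _).mp h) hkeys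
    obtain ⟨v, hv⟩ := Option.ne_none_iff_exists'.mp hne
    have hitems := PySem.Dict.mem_items_of_get?_eq_some _ hv
    have hval : (pvCntB (pvRunsSpec l)).getD (c, (k : Int)) 0 = v := by
      rw [PySem.Dict.getD_eq_get?_getD, hv]
      rfl
    rw [pvCntB_getD] at hval
    refine ⟨((c, (k : Int)), v), ⟨hitems, by omega⟩, rfl⟩

theorem pvMain (s : String) : longestSpecialSubstring s = longestSpecialSubstring_alt s := by
  unfold longestSpecialSubstring longestSpecialSubstring_alt
  rw [pvFold_eq_build, pvRunsB_eq_spec]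
  rw [PySem.List.foldl_ite_eq_foldl_filter (p := fun p : List Char × Int => p.2 ≥ 3)
    (f := fun m p => max m ((p.1.length : Int)))]
  rw [PySem.List.foldl_ite_eq_foldl_filter (p := fun p : (Char × Int) × Int => p.2 ≥ 3)
    (f := fun m p => max m p.1.2)]
  rw [← List.foldl_map (f := fun p : List Char × Int => ((p.1.length : Int))) (g := max)]
  rw [← List.foldl_map (f := fun p : (Char × Int) × Int => p.1.2) (g := max)]
  apply pvMaxSet
  intro x
  rw [pvMemA, pvMemB]

-- ===== VERDICT (by name: the statement is the Claim_ definition above) =====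
theorem longestSpecialSubstring_spec : Claim_equal_longestSpecialSubstring := by
  intro s _
  unfold Spec_longestSpecialSubstring
  exact pvMain s
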